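-- pv_equiv track=rewrite | github.com/acecocoa/CORRECT-SCORE-PREDICTOR-FLASHSCORE-SCORES-SCRAPER-AND-PARSER | PREDICTOR(F4)(short).py | decide_divergence2
-- ===== SOURCE A (Python) =====
-- def decide_divergence2(results):
--     values = [v['value'] for v in results.values()]
--
--     if len(set(values)) == 1:
--         return values[0]
--
--     for key in ("MIR+INV", "_INVERS", "_MIROIR", "_DIRECT", "_SIGNES", "__REPLI"):
--         for k, v in results.items():
--             if k.startswith(key):
--                 return v['value']
--
--     return None
-- ===== SOURCE B (Python) =====
-- PREFIXES = ("MIR+INV", "_INVERS", "_MIROIR", "_DIRECT", "_SIGNES", "__REPLI")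
--
-- def decide_divergence2(results):
--     values = [v['value'] for v in results.values()]
--
--     if values and all(x == values[0] for x in values):
--         return values[0]
--
--     chosen = {}
--     for k, v in results.items():
--         for p in PREFIXES:
--             if k.startswith(p) and p not in chosen:
--                 chosen[p] = v['value']
--
--     for p in PREFIXES:
--         if p in chosen:
--             return chosen[p]
--     return None
-- ===== Notes on version B (the rewrite author's own statement) =====
-- stated objective: alternative
-- what changed: Replaces A's six full re-scans of the dict (one per priority prefix) with a single pass that records the first value seen for each prefix in a dict, followed by one scan of the priority tuple.
import Mathlib
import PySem

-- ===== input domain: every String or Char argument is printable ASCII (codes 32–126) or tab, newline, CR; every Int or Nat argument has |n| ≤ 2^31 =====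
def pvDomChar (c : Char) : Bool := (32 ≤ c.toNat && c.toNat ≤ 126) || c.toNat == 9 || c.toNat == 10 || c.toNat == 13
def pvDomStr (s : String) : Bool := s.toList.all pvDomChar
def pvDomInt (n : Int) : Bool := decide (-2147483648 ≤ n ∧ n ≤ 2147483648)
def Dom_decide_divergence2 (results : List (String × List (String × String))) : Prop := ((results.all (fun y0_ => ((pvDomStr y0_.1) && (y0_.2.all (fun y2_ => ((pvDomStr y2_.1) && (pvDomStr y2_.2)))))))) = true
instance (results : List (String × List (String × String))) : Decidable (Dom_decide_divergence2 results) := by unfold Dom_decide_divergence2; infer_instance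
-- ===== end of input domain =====

-- B replaces A's six full re-scans of the dict (one per priority prefix) with a single pass
-- recording the first value per prefix in a dict, then one scan of the priority tuple ("alternative").

-- the priority tuple, shared data of both programs
def pvPrefixes : List String := ["MIR+INV", "_INVERS", "_MIROIR", "_DIRECT", "_SIGNES", "__REPLI"]

-- v['value'] on an inner dict; exact whenever "value" is present (guaranteed by Pre_)
def pvValue (d : List (String × String)) : String :=
  ((PySem.Dict.mk d).get? "value").getD ""

-- ===== PORT A =====
-- inner loop:  for k, v in results.items(): if k.startswith(key): return v['value']
def pvInnerA (key : String) : List (String × List (String × String)) → Option String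
  | [] => none
  | (k, v) :: t => if PySem.Str.startswith k key then some (pvValue v) else pvInnerA key t

-- outer loop:  for key in (…): …
def pvOuterA : List String → List (String × List (String × String)) → Option String
  | [], _ => none
  | key :: rest, rs =>
    match pvInnerA key rs with
    | some v => some v
    | none => pvOuterA rest rs

def decide_divergence2 (results : List (String × List (String × String))) : Option String :=
  let values := results.map (fun p => pvValue p.2)
  if (PySem.Set.ofList values).length == 1 then
    PySem.List.pyGet? values 0
  else
    pvOuterA pvPrefixes results

-- ===== PORT B =====
-- final loop:  for p in PREFIXES: if p in chosen: return chosen[p]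
def pvPickB : List String → PySem.Dict String String → Option String
  | [], _ => none
  | p :: t, chosen =>
    match chosen.get? p with
    | some v => some v
    | none => pvPickB t chosen

def decide_divergence2_alt (results : List (String × List (String × String))) : Option String :=
  let values := results.map (fun p => pvValue p.2)
  -- if values and all(x == values[0] for x in values): return values[0]
  if !values.isEmpty && values.all (fun x => x == (PySem.List.pyGet? values 0).getD "") then
    PySem.List.pyGet? values 0
  else
    let chosen := results.foldl
      (fun chosen kv =>
        pvPrefixes.foldl
          (fun chosen p =>
            if PySem.Str.startswith kv.1 p && !(chosen.contains p) then
              chosen.insert p (pvValue kv.2)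
            else chosen)
          chosen)
      PySem.Dict.empty
    pvPickB pvPrefixes chosen

-- ===== PRECONDITION & SPEC =====
-- Pre_ excludes exactly the inputs on which Python A raises KeyError: some inner dict without a "value" key.
def Pre_decide_divergence2 (results : List (String × List (String × String))) : Prop :=
  (results.all (fun p => ((PySem.Dict.mk p.2).get? "value").isSome)) = true
instance (results : List (String × List (String × String))) : Decidable (Pre_decide_divergence2 results) := by unfold Pre_decide_divergence2; infer_instance

def pvWitness_decide_divergence2 : (List (String × List (String × String))) :=
  [("_DIRECT_A", [("value", "1-0")]), ("_MIROIR_B", [("value", "2-1")])]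

def Spec_decide_divergence2 (results : List (String × List (String × String))) (out : Option String) : Prop := out = decide_divergence2_alt results
instance (results : List (String × List (String × String))) (out : Option String) : Decidable (Spec_decide_divergence2 results out) := by unfold Spec_decide_divergence2; infer_instance

-- ===== CLAIM (what is proved, stated in full; the proofs are below) =====
def Claim_equal_decide_divergence2 : Prop := ∀ (results : List (String × List (String × String))), Dom_decide_divergence2 results → Pre_decide_divergence2 results → Spec_decide_divergence2 results (decide_divergence2 results)

-- ===== LEMMAS AND PROOFS =====

-- a fold of Set.add never shrinks the set
theorem pvFoldAdd_len_le (t : List String) (s : PySem.Set String) :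
    s.length ≤ (t.foldl PySem.Set.add s).length := by
  induction t generalizing s with
  | nil => exact le_refl _
  | cons x t ih =>
    refine le_trans ?_ (ih (PySem.Set.add s x))
    simp only [PySem.Set.add]
    split_ifs
    · exact le_refl _
    · simp

-- set(values) is a singleton iff values is nonempty with all elements equal to its head
theorem pvAllEq (t : List String) (h : String) :
    ((t.foldl PySem.Set.add [h]).length == 1) = t.all (fun x => x == h) := by
  induction t with
  | nil => rfl
  | cons x t ih =>
    simp only [List.foldl_cons, List.all_cons]
    by_cases hx : x = h
    · subst hx
      have : PySem.Set.add [x] x = [x] := by simp [PySem.Set.add]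
      rw [this, ih]
      simp
    · have : PySem.Set.add [h] x = [h, x] := by
        simp [PySem.Set.add, hx]
      rw [this]
      have hle := pvFoldAdd_len_le t [h, x]
      have hx' : (x == h) = false := by simp [hx]
      simp only [hx', Bool.false_and]
      simp only [List.length_cons, List.length_nil] at hle
      have : ((t.foldl PySem.Set.add [h, x]).length == 1) = false := by
        simp only [beq_eq_false_iff_ne, ne_eq]
        omega
      rw [this]

-- A's all-equal test equals B's
theorem pvCond (xs : List String) :
    ((PySem.Set.ofList xs).length == 1)
    = (!xs.isEmpty && xs.all (fun x => x == (PySem.List.pyGet? xs 0).getD "")) := by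
  cases xs with
  | nil => rfl
  | cons h t =>
    have hget : PySem.List.pyGet? (h :: t) 0 = some h := by
      simp [PySem.List.pyGet?, PySem.List.pyIdx?]
    have hof : PySem.Set.ofList (h :: t) = t.foldl PySem.Set.add [h] := by
      rfl
    rw [hof, hget, pvAllEq]
    simp

-- One step of B's outer fold (the inner fold over the prefixes) preserves the lookup of a prefix not in ps
theorem pvFoldInner_not_mem (ps : List String) (k : String) (w : String)
    (ch : PySem.Dict String String) (pre : String) (hpre : pre ∉ ps) :
    (ps.foldl
      (fun chosen p =>
        if PySem.Str.startswith k p && !(chosen.contains p) then chosen.insert p w else chosen)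
      ch).get? pre = ch.get? pre := by
  induction ps generalizing ch with
  | nil => rfl
  | cons q t ih =>
    simp only [List.mem_cons, not_or] at hpre
    simp only [List.foldl_cons]
    rw [ih _ hpre.2]
    split_ifs with h
    · exact PySem.Dict.get?_insert_of_ne _ _ (fun he => hpre.1 he)
    · rfl

-- The inner fold over a Nodup prefix list: the lookup of pre ∈ ps afterwards is the old value,
-- or (if absent) the new one when k starts with pre
theorem pvFoldInner_get? (ps : List String) (k : String) (w : String)
    (ch : PySem.Dict String String) (pre : String) (hmem : pre ∈ ps) (hnd : ps.Nodup) :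
    (ps.foldl
      (fun chosen p =>
        if PySem.Str.startswith k p && !(chosen.contains p) then chosen.insert p w else chosen)
      ch).get? pre
    = (ch.get? pre).or (if PySem.Str.startswith k pre then some w else none) := by
  induction ps generalizing ch with
  | nil => cases hmem
  | cons q t ih =>
    have hnd' := List.nodup_cons.mp hnd
    simp only [List.foldl_cons]
    rcases List.mem_cons.mp hmem with h | h
    · subst h
      rw [pvFoldInner_not_mem t k w _ pre hnd'.1]
      rcases hsome : ch.get? pre with _ | v
      · have hc : ch.contains pre = false := by
          rw [PySem.Dict.contains_eq_isSome_get?, hsome]; rfl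
        rw [hc]
        simp only [Bool.not_false, Bool.and_true]
        split_ifs with hs
        · simp [PySem.Dict.get?_insert_self]
        · simp [hsome]
      · have hc : ch.contains pre = true := by
          rw [PySem.Dict.contains_eq_isSome_get?, hsome]; rfl
        simp [hc, hsome]
    · have hne : pre ≠ q := fun he => hnd'.1 (he ▸ h)
      rw [ih _ h hnd'.2]
      split_ifs
      all_goals first
        | rfl
        | rw [PySem.Dict.get?_insert_of_ne _ _ hne]

-- B's outer fold computes, at each prefix, A's inner scan (first matching value), modulo what ch already holds
theorem pvFoldOuter_get? (rs : List (String × List (String × String)))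
    (ch : PySem.Dict String String) (pre : String) (hmem : pre ∈ pvPrefixes) :
    (rs.foldl
      (fun chosen kv =>
        pvPrefixes.foldl
          (fun chosen p =>
            if PySem.Str.startswith kv.1 p && !(chosen.contains p) then
              chosen.insert p (pvValue kv.2)
            else chosen)
          chosen)
      ch).get? pre
    = (ch.get? pre).or (pvInnerA pre rs) := by
  induction rs generalizing ch with
  | nil => simp [pvInnerA]
  | cons kv t ih =>
    have hnd : pvPrefixes.Nodup := by decide
    simp only [List.foldl_cons]
    rw [ih, pvFoldInner_get? pvPrefixes kv.1 (pvValue kv.2) ch pre hmem hnd]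
    rcases kv with ⟨k, v⟩
    simp only [pvInnerA]
    rcases hsome : ch.get? pre with _ | u
    · simp only [Option.none_or]
      split_ifs with hs <;> simp
    · simp

-- pick = A's outer loop, once every prefix looks up to A's inner scan
theorem pvPick_eq_outer (ps : List String) (rs : List (String × List (String × String)))
    (ch : PySem.Dict String String)
    (h : ∀ p ∈ ps, ch.get? p = pvInnerA p rs) :
    pvOuterA ps rs = pvPickB ps ch := by
  induction ps with
  | nil => rfl
  | cons q t ih =>
    simp only [pvPickB, pvOuterA]
    rw [h q (List.mem_cons_self ..)]
    cases pvInnerA q rs with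
    | none => exact ih (fun p hp => h p (List.mem_cons_of_mem _ hp))
    | some v => rfl

-- ===== VERDICT (by name: the statement is the Claim_ definition above) =====
theorem decide_divergence2_spec : Claim_equal_decide_divergence2 := by
  intro results _ _
  unfold Spec_decide_divergence2 decide_divergence2 decide_divergence2_alt
  simp only [pvCond]
  split_ifs with h
  · rfl
  · exact pvPick_eq_outer pvPrefixes results _
      (fun p hp => by
        rw [pvFoldOuter_get? results PySem.Dict.empty p hp]
        simp [PySem.Dict.get?_empty])
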